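-- pv_equiv track=rewrite | github.com/mrkaye97/advent-of-code | 2023/day14.py | adjust_column_north
-- ===== SOURCE A (Python) =====
-- from copy import deepcopy
--
-- def adjust_column_north(col: list[str]):
--     for position in range(1, len(col)):
--         prev = deepcopy(position) - 1
--         while prev >= 0 and col[prev + 1] == "O" and col[prev] == ".":
--             curr = prev + 1
--             col[curr - 1] = "O"
--             col[curr] = "."
--
--             prev -= 1
--
--     return col
-- ===== SOURCE B (Python) =====
-- def adjust_column_north(col: list[str]):
--     # Single pass: 'free' is the next landing slot for an 'O'; any element
--     # other than '.' or 'O' blocks and resets the slot past itself.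
--     # Mutates col in place (same observable side effect as the original).
--     n = len(col)
--     out = ["."] * n
--     free = 0
--     for i, c in enumerate(col):
--         if c == "O":
--             out[free] = "O"
--             free += 1
--         elif c != ".":
--             out[i] = c
--             free = i + 1
--     col[:] = out
--     return col
-- ===== Notes on version B (the rewrite author's own statement) =====
-- stated objective: faster
-- what changed: Replaces the quadratic bubble-each-rock-up-past-dots nested loop with a single left-to-right pass that keeps a next-free-slot pointer (reset past every blocker) and writes each 'O' directly to its landing position.
import Mathlib
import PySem

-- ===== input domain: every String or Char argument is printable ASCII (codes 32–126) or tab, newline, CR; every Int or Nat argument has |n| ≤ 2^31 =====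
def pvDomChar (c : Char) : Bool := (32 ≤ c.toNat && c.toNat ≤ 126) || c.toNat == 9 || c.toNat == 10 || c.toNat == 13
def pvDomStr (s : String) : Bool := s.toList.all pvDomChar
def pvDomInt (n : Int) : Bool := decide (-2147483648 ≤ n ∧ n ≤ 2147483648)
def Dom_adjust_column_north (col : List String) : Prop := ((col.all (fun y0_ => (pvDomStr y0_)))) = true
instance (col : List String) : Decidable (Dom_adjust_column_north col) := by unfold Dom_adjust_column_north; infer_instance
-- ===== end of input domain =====

-- B rolls the rocks in ONE pass with a next-free-slot pointer instead of A's nested bubble loops.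
-- Both Pythons mutate `col` in place to the same final contents and return it; the theorems are about the returned value.

-- ===== PORT A =====
-- inner while loop of A; all indices accessed are in range whenever A runs, so getD "" is exact there
def adjA_inner (col : List String) (prev : Int) : List String :=
  if 0 ≤ prev ∧ col.getD (prev + 1).toNat "" = "O" ∧ col.getD prev.toNat "" = "." then
    adjA_inner ((col.set prev.toNat "O").set (prev + 1).toNat ".") (prev - 1)
  else col
termination_by (prev + 1).toNat
decreasing_by omega

def adjust_column_north (col : List String) : List String :=
  (PySem.List.pyRange 1 (col.length : Int) 1).foldl
    (fun c position => adjA_inner c (position - 1)) col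

-- ===== PORT B =====
def adjust_column_north_alt (col : List String) : List String :=
  ((PySem.List.enumerate col 0).foldl
    (fun (st : List String × Nat) ic =>
      if ic.2 = "O" then (st.1.set st.2 "O", st.2 + 1)
      else if ic.2 ≠ "." then (st.1.set ic.1.toNat ic.2, ic.1.toNat + 1)
      else st)
    (List.replicate col.length ".", 0)).1

-- ===== PRECONDITION & SPEC =====
def Spec_adjust_column_north (col : List String) (out : List String) : Prop := out = adjust_column_north_alt col
instance (col : List String) (out : List String) : Decidable (Spec_adjust_column_north col out) := by unfold Spec_adjust_column_north; infer_instance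

-- ===== CLAIM (what is proved, stated in full; the proofs are below) =====
def Claim_equal_adjust_column_north : Prop := ∀ (col : List String), Dom_adjust_column_north col → Spec_adjust_column_north col (adjust_column_north col)

-- ===== LEMMAS AND PROOFS =====

-- trailing-dot decomposition of a list: l = tcore l ++ replicate (tk l) "."
def tcore (l : List String) : List String := (l.reverse.dropWhile (· = ".")).reverse
def tk (l : List String) : Nat := (l.reverse.takeWhile (· = ".")).length

-- common functional description of one rolled-north column, built element by element
def nstep (acc : List String) (c : String) : List String :=
  if c = "O" then tcore acc ++ "O" :: List.replicate (tk acc) "." else acc ++ [c]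
def nroll (l : List String) : List String := l.foldl nstep []

theorem tcore_append_tk (l : List String) :
    tcore l ++ List.replicate (tk l) "." = l := by
  have hrep : l.reverse.takeWhile (· = ".") = List.replicate (tk l) "." := by
    have h := List.eq_replicate_of_mem (a := ".")
      (l := l.reverse.takeWhile (· = ".")) (fun b hb => by
        have := List.mem_takeWhile_imp hb
        simpa using this)
    simpa [tk] using h
  calc tcore l ++ List.replicate (tk l) "."
      = (l.reverse.dropWhile (· = ".")).reverse ++ (l.reverse.takeWhile (· = ".")).reverse := by
        rw [hrep, List.reverse_replicate]; rfl
    _ = (l.reverse.takeWhile (· = ".") ++ l.reverse.dropWhile (· = ".")).reverse := by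
        rw [List.reverse_append]
    _ = l := by rw [List.takeWhile_append_dropWhile, List.reverse_reverse]

theorem head?_dropWhile_dot (r : List String) (x : String)
    (h : (r.dropWhile (· = ".")).head? = some x) : x ≠ "." := by
  induction r with
  | nil => simp at h
  | cons a t ih =>
    by_cases ha : a = "."
    · rw [List.dropWhile_cons_of_pos (by simpa using ha)] at h; exact ih h
    · rw [List.dropWhile_cons_of_neg (by simpa using ha)] at h
      simp at h; subst h; exact ha

theorem tcore_getLast_ne (l : List String) (x : String)
    (h : (tcore l).getLast? = some x) : x ≠ "." := by
  have := List.getLast?_reverse (l := l.reverse.dropWhile (· = "."))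
  rw [tcore, this] at h
  exact head?_dropWhile_dot _ _ h

-- canonical form: appending trailing dots to a list not ending in "." gives exactly that decomposition
theorem tcore_canon (m : List String) (k : Nat)
    (hm : ∀ x, m.getLast? = some x → x ≠ ".") :
    tcore (m ++ List.replicate k ".") = m ∧ tk (m ++ List.replicate k ".") = k := by
  have hdm : m.reverse.dropWhile (· = ".") = m.reverse := by
    cases hrev : m.reverse with
    | nil => simp
    | cons a t =>
      have ha : a ≠ "." := by
        apply hm
        rw [← List.head?_reverse, hrev]; rfl
      exact List.dropWhile_cons_of_neg (by simpa using ha)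
  have htm : m.reverse.takeWhile (· = ".") = [] := by
    cases hrev : m.reverse with
    | nil => simp
    | cons a t =>
      have ha : a ≠ "." := by
        apply hm
        rw [← List.head?_reverse, hrev]; rfl
      exact List.takeWhile_cons_of_neg (by simpa using ha)
  constructor
  · rw [tcore, List.reverse_append, List.reverse_replicate, List.dropWhile_append]
    simp [List.dropWhile_replicate, hdm]
  · rw [tk, List.reverse_append, List.reverse_replicate, List.takeWhile_append]
    simp [List.takeWhile_replicate, htm]

theorem length_nstep (acc : List String) (c : String) :
    (nstep acc c).length = acc.length + 1 := by
  have h := congrArg List.length (tcore_append_tk acc)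
  simp only [List.length_append, List.length_replicate] at h
  unfold nstep
  split <;> simp <;> omega

theorem length_foldl_nstep (l acc : List String) :
    (List.foldl nstep acc l).length = acc.length + l.length := by
  induction l generalizing acc with
  | nil => simp
  | cons c t ih => simp [List.foldl, ih, length_nstep]; omega

theorem length_nroll (l : List String) : (nroll l).length = l.length := by
  simpa [nroll] using length_foldl_nstep l []

theorem nroll_concat (l : List String) (c : String) :
    nroll (l ++ [c]) = nstep (nroll l) c := by
  simp [nroll, List.foldl_append]

-- A's inner loop bubbles the freshly appended "O" up past the trailing dots
theorem bubble (front : List String)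
    (hf : ∀ x, front.getLast? = some x → x ≠ ".") :
    ∀ (k : Nat) (rest : List String),
    adjA_inner (front ++ List.replicate k "." ++ "O" :: rest) ((front.length : Int) + k - 1)
      = front ++ "O" :: List.replicate k "." ++ rest := by
  intro k
  induction k with
  | zero =>
    intro rest
    rw [adjA_inner, if_neg]
    · simp
    rintro ⟨h0, -, h2⟩
    simp only [List.replicate_zero, List.append_nil, Nat.cast_zero, add_zero] at h0 h2
    cases hfr : front.getLast? with
    | none =>
      rw [List.getLast?_eq_none_iff] at hfr
      subst hfr
      simp at h0
    | some x =>
      have hne : front ≠ [] := by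
        intro hnil; rw [hnil] at hfr; simp at hfr
      have hlen : 0 < front.length := List.length_pos_iff.mpr hne
      have htn : ((front.length : Int) - 1).toNat = front.length - 1 := by omega
      rw [htn] at h2
      rw [List.getD_append front ("O" :: rest) "" (front.length - 1) (by omega)] at h2
      have : front.getD (front.length - 1) "" = x := by
        rw [List.getD_eq_getElem?_getD, ← List.getLast?_eq_getElem?, hfr]; rfl
      rw [this] at h2
      exact hf x hfr h2
  | succ k ih =>
    intro rest
    have hsplit : front ++ List.replicate (k + 1) "." ++ "O" :: rest
        = (front ++ List.replicate k ".") ++ "." :: "O" :: rest := by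
      rw [List.replicate_succ']; simp [List.append_assoc]
    rw [hsplit]
    push_cast
    rw [adjA_inner]
    have hL : (front ++ List.replicate k ".").length = front.length + k := by simp
    have h1 : (((front.length : Int) + (k + 1) - 1) + 1).toNat = (front.length + k) + 1 := by
      push_cast; omega
    have h2 : ((front.length : Int) + (k + 1) - 1).toNat = front.length + k := by
      push_cast; omega
    rw [if_pos]
    · rw [h1, h2]
      have hset1 : ((front ++ List.replicate k ".") ++ "." :: "O" :: rest).set
          (front.length + k) "O" = (front ++ List.replicate k ".") ++ "O" :: "O" :: rest := by
        rw [List.set_append, if_neg (by omega)]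
        simp [hL]
      have hset2 : ((front ++ List.replicate k ".") ++ "O" :: "O" :: rest).set
          ((front.length + k) + 1) "." = (front ++ List.replicate k ".") ++ "O" :: "." :: rest := by
        rw [List.set_append, if_neg (by omega)]
        have : (front.length + k) + 1 - (front ++ List.replicate k ".").length = 1 := by omega
        rw [this]; rfl
      rw [hset1, hset2]
      have hre : (front ++ List.replicate k ".") ++ "O" :: "." :: rest
          = front ++ List.replicate k "." ++ "O" :: ("." :: rest) := by
        simp [List.append_assoc]
      have hidx : (front.length : Int) + (k + 1) - 1 - 1 = (front.length : Int) + k - 1 := by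
        push_cast; ring
      rw [hre, hidx, ih ("." :: rest)]
      rw [List.replicate_succ']
      simp [List.append_assoc]
    · refine ⟨by push_cast; omega, ?_, ?_⟩
      · rw [h1, List.getD_append_right _ _ _ _ (by omega)]
        have : (front.length + k) + 1 - (front ++ List.replicate k ".").length = 1 := by omega
        rw [this]; rfl
      · rw [h2, List.getD_append_right _ _ _ _ (by omega)]
        have : (front.length + k) - (front ++ List.replicate k ".").length = 0 := by omega
        rw [this]; rfl

theorem adjA_inner_noop (l : List String) (p : Int)
    (h : l.getD (p + 1).toNat "" ≠ "O") : adjA_inner l p = l := by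
  rw [adjA_inner, if_neg]
  rintro ⟨-, h1, -⟩
  exact h h1

theorem outer_inv (col : List String) (p : Nat) (hp : p ≤ col.length) :
    (PySem.List.pyRange 1 (p : Int) 1).foldl
      (fun c position => adjA_inner c (position - 1)) col
      = nroll (col.take p) ++ col.drop p := by
  induction p with
  | zero => rw [PySem.List.pyRange_one_eq_nil (by norm_num)]; simp [nroll]
  | succ p ih =>
    by_cases hp0 : p = 0
    · subst hp0
      rw [show ((0 + 1 : Nat) : Int) = 1 by norm_num,
        PySem.List.pyRange_one_eq_nil (by norm_num)]
      cases col with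
      | nil => simp at hp
      | cons x xs =>
        have hx1 : nroll [x] = [x] := by
          unfold nroll nstep
          simp only [List.foldl_cons, List.foldl_nil]
          split
          · rename_i hx
            simp [tcore, tk, hx]
          · simp
        simp only [List.foldl_nil, List.take, List.drop]
        rw [hx1]
        simp
    · have h1p : (1 : Int) ≤ (p : Int) := by omega
      have hplt : p < col.length := by omega
      rw [show ((p + 1 : Nat) : Int) = (p : Int) + 1 by push_cast; ring,
        PySem.List.pyRange_one_succ_right h1p, List.foldl_append]
      rw [ih (by omega)]
      simp only [List.foldl_cons, List.foldl_nil]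
      rw [List.drop_eq_getElem_cons hplt]
      have hlys : (nroll (col.take p)).length = p := by
        rw [length_nroll, List.length_take]; omega
      have htake : col.take (p + 1) = col.take p ++ [col[p]] := by
        rw [List.take_succ]; simp [List.getElem?_eq_getElem hplt]
      rw [htake, nroll_concat]
      by_cases hc : col[p] = "O"
      · rw [hc]
        have hd := tcore_append_tk (nroll (col.take p))
        have hlen := congrArg List.length hd
        simp only [List.length_append, List.length_replicate] at hlen
        rw [hlys] at hlen
        have hre : nroll (col.take p) ++ "O" :: List.drop (p + 1) col
            = tcore (nroll (col.take p)) ++ List.replicate (tk (nroll (col.take p))) "."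
              ++ "O" :: List.drop (p + 1) col := by
          conv_lhs => rw [← hd]
        have hidx : (p : Int) - 1
            = ((tcore (nroll (col.take p))).length : Int) + tk (nroll (col.take p)) - 1 := by
          push_cast; omega
        rw [hre, hidx, bubble _ (tcore_getLast_ne _)]
        unfold nstep
        rw [if_pos rfl]
      · rw [adjA_inner_noop]
        · unfold nstep
          rw [if_neg hc]
          simp [List.append_assoc]
        · have : ((p : Int) - 1 + 1).toNat = p := by omega
          rw [this, List.getD_append_right _ _ _ _ (by omega)]
          rw [show p - (nroll (col.take p)).length = 0 by omega, List.getD_cons_zero]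
          exact hc

theorem A_eq_nroll (col : List String) : adjust_column_north col = nroll col := by
  unfold adjust_column_north
  rw [outer_inv col col.length (le_refl _)]
  simp

theorem B_inv (col : List String) (i : Nat) (hi : i ≤ col.length) :
    (PySem.List.enumerate (col.take i) 0).foldl
      (fun (st : List String × Nat) ic =>
        if ic.2 = "O" then (st.1.set st.2 "O", st.2 + 1)
        else if ic.2 ≠ "." then (st.1.set ic.1.toNat ic.2, ic.1.toNat + 1)
        else st)
      (List.replicate col.length ".", 0)
      = (nroll (col.take i) ++ List.replicate (col.length - i) ".",
         (tcore (nroll (col.take i))).length) := by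
  induction i with
  | zero => simp [PySem.List.enumerate_nil, nroll, tcore]
  | succ i ih =>
    have hilt : i < col.length := by omega
    have htake : col.take (i + 1) = col.take i ++ [col[i]] := by
      rw [List.take_succ]; simp [List.getElem?_eq_getElem hilt]
    rw [htake, PySem.List.enumerate_append, List.foldl_append, ih (by omega)]
    have hlti : (col.take i).length = i := by simp; omega
    rw [hlti, PySem.List.enumerate_cons, PySem.List.enumerate_nil]
    simp only [List.foldl_cons, List.foldl_nil, zero_add]
    set Ni := nroll (col.take i) with hNi
    have hlys : Ni.length = i := by rw [hNi, length_nroll]; simpa using hlti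
    have hd := tcore_append_tk Ni
    have hlen := congrArg List.length hd
    simp only [List.length_append, List.length_replicate] at hlen
    rw [hlys] at hlen
    rw [nroll_concat, ← hNi]
    by_cases hc : col[i] = "O"
    · rw [hc]
      rw [if_pos rfl, Prod.mk.injEq]
      unfold nstep
      rw [if_pos rfl]
      have hout : Ni ++ List.replicate (col.length - i) "."
          = tcore Ni ++ List.replicate (tk Ni + (col.length - i)) "." := by
        conv_lhs => rw [← hd]
        rw [List.replicate_add, List.append_assoc]
      have hset : (tcore Ni ++ List.replicate (tk Ni + (col.length - i)) ".").set
          (tcore Ni).length "O"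
          = tcore Ni ++ "O" :: List.replicate (tk Ni + (col.length - i) - 1) "." := by
        rw [List.set_append, if_neg (by omega)]
        rw [show (tcore Ni).length - (tcore Ni).length = 0 by omega]
        rw [show tk Ni + (col.length - i) = (tk Ni + (col.length - i) - 1) + 1 by omega,
          List.replicate_succ]
        rfl
      have hcanon := tcore_canon (tcore Ni ++ ["O"]) (tk Ni)
        (fun x hx => by rw [List.getLast?_concat] at hx; cases hx; simp)
      have hshape : tcore Ni ++ "O" :: List.replicate (tk Ni) "."
          = (tcore Ni ++ ["O"]) ++ List.replicate (tk Ni) "." := by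
        simp [List.append_assoc]
      constructor
      · rw [hout, hset]
        rw [show tk Ni + (col.length - i) - 1 = tk Ni + (col.length - (i + 1)) by omega,
          List.replicate_add]
        simp [List.append_assoc]
      · rw [hshape, hcanon.1]
        simp
    · by_cases hdot : col[i] = "."
      · rw [hdot]
        rw [if_neg (by decide : ¬ ("." : String) = "O"),
          if_neg (by decide : ¬ (("." : String) ≠ ".")), Prod.mk.injEq]
        unfold nstep
        rw [if_neg (by simpa using hdot ▸ hc)]
        have hcanon := tcore_canon (tcore Ni) (tk Ni + 1) (tcore_getLast_ne Ni)
        have hshape : Ni ++ ["."] = tcore Ni ++ List.replicate (tk Ni + 1) "." := by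
          conv_lhs => rw [← hd]
          rw [List.replicate_succ']
          simp [List.append_assoc]
        constructor
        · rw [show col.length - i = 1 + (col.length - (i + 1)) by omega, List.replicate_add]
          simp [List.append_assoc]
        · rw [hshape, hcanon.1]
      · rw [if_neg hc, if_pos hdot, Prod.mk.injEq]
        unfold nstep
        rw [if_neg hc]
        have htn : ((i : Int)).toNat = i := by omega
        have hset : (Ni ++ List.replicate (col.length - i) ".").set i col[i]
            = (Ni ++ [col[i]]) ++ List.replicate (col.length - (i + 1)) "." := by
          rw [List.set_append, if_neg (by omega)]
          rw [show i - Ni.length = 0 by omega]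
          rw [show col.length - i = (col.length - (i + 1)) + 1 by omega, List.replicate_succ]
          simp [List.append_assoc]
        have hcanon := tcore_canon (Ni ++ [col[i]]) 0
          (fun x hx => by rw [List.getLast?_concat] at hx; cases hx; exact hdot)
        simp only [List.replicate_zero, List.append_nil] at hcanon
        rw [htn, hset, hcanon.1]
        constructor
        · rfl
        · simp [hlys]

theorem B_eq_nroll (col : List String) : adjust_column_north_alt col = nroll col := by
  unfold adjust_column_north_alt
  have := B_inv col col.length (le_refl _)
  rw [List.take_length] at this
  rw [this]
  simp

-- ===== VERDICT (by name: the statement is the Claim_ definition above) =====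
theorem adjust_column_north_spec : Claim_equal_adjust_column_north := by
  intro col _
  unfold Spec_adjust_column_north
  rw [A_eq_nroll, B_eq_nroll]
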